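-- pv_equiv track=rewrite | github.com/jin-james/code_lbj | answersheet/wangshouyueAS.py | get_binary_code
-- ===== SOURCE A (Python) =====
-- def get_binary_code(page_count):
--     sum = []
--     for i in range(1, page_count + 1):
--         binary = []
--         m, n = divmod(i, 2)
--         recurrent(m, n, binary)
--         sum.append(binary)
--     blank_count = max(max([len(ls) for ls in sum]), 3)
--     for ls in sum:
--         gap = blank_count - len(ls)
--         for i in range(gap):
--             ls.insert(0, 0)
--     return sum
--
-- def recurrent(m, n, binary):
--     if m == 0:
--         binary.insert(0, n)
--     else:
--         binary.insert(0, n)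
--         m2, n2 = divmod(m, 2)
--         recurrent(m2, n2, binary)
-- ===== SOURCE B (Python) =====
-- def get_binary_code(page_count):
--     codes = [[int(c) for c in bin(i)[2:]] for i in range(1, page_count + 1)]
--     width = max(max(len(c) for c in codes), 3)
--     return [[0] * (width - len(c)) + c for c in codes]
-- ===== Notes on version B (the rewrite author's own statement) =====
-- stated objective: idiomatic
-- what changed: Digits come from the bin() builtin in a comprehension instead of a recursive divmod helper that mutates an accumulator, and padding is done by list concatenation ([0]*(width-len(c)) + c) instead of repeated insert(0,0) on the stored lists.
import Mathlib
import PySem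

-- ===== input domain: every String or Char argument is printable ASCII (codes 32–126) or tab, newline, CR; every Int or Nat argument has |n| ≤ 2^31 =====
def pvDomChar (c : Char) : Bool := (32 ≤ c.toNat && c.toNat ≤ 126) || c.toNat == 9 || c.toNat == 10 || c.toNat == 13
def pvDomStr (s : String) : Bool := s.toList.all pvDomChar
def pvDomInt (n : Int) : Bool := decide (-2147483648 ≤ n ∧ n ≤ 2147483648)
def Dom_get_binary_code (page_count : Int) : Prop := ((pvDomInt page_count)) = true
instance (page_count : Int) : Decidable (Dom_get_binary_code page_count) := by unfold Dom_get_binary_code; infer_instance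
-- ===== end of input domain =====

-- B replaces A's mutating recursive divmod helper by direct binary-digit generation per number
-- and replaces in-place insert(0,0) padding by replicate-and-concatenate (objective: idiomatic).

-- ===== PORT A =====
-- 'recurrent' with fuel = m.toNat + 1: a totality guard only; never exhausted for the 0 ≤ m
-- values A reaches (the fuel-0 branch mirrors the m = 0 base case).
def pvRecurrent : Nat → Int → Int → List Int → List Int
  | 0, _, n, binary => n :: binary
  | fuel + 1, m, n, binary =>
    if m = 0 then n :: binary
    else pvRecurrent fuel (PySem.Int.floordiv m 2) (PySem.Int.mod m 2) (n :: binary)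

def get_binary_code (page_count : Int) : List (List Int) :=
  let sum := (PySem.List.pyRange 1 (page_count + 1) 1).map (fun i =>
    let m := PySem.Int.floordiv i 2
    let n := PySem.Int.mod i 2
    pvRecurrent (m.toNat + 1) m n [])
  match PySem.List.max? (sum.map (fun ls => (ls.length : Int))) (fun x => x) with
  | none => []  -- Python's max([]) raises ValueError here (page_count ≤ 0): excluded by Pre_
  | some mx =>
    let blank_count := max mx 3
    sum.map (fun ls =>
      let gap := blank_count - (ls.length : Int)
      (PySem.List.pyRange 0 gap 1).foldl (fun acc _ => (0 : Int) :: acc) ls)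

-- ===== PORT B =====
-- bin(i)[2:] digits of a positive number, most significant first
def pvBinDigits (n : Nat) : List Int :=
  if _h : n = 0 then [] else pvBinDigits (n / 2) ++ [((n % 2 : Nat) : Int)]
  termination_by n
  decreasing_by exact Nat.div_lt_self (Nat.pos_of_ne_zero _h) one_lt_two

def get_binary_code_alt (page_count : Int) : List (List Int) :=
  let codes := (PySem.List.pyRange 1 (page_count + 1) 1).map (fun i => pvBinDigits i.toNat)
  match PySem.List.max? (codes.map (fun c => (c.length : Int))) (fun x => x) with
  | none => []  -- max over the empty generator raises ValueError, as in A: excluded by Pre_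
  | some mx =>
    let width := max mx 3
    codes.map (fun c => List.replicate (width - (c.length : Int)).toNat 0 ++ c)

-- ===== PRECONDITION & SPEC =====
-- Pre_ excludes page_count ≤ 0, where both Pythons raise ValueError (max of an empty sequence).
def Pre_get_binary_code (page_count : Int) : Prop := 1 ≤ page_count
instance (page_count : Int) : Decidable (Pre_get_binary_code page_count) := by
  unfold Pre_get_binary_code; infer_instance
def pvWitness_get_binary_code : Int := (3)

def Spec_get_binary_code (page_count : Int) (out : List (List Int)) : Prop := out = get_binary_code_alt page_count
instance (page_count : Int) (out : List (List Int)) : Decidable (Spec_get_binary_code page_count out) := by unfold Spec_get_binary_code; infer_instance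

-- ===== CLAIM (what is proved, stated in full; the proofs are below) =====
def Claim_equal_get_binary_code : Prop := ∀ (page_count : Int), Dom_get_binary_code page_count → Pre_get_binary_code page_count → Spec_get_binary_code page_count (get_binary_code page_count)

-- ===== LEMMAS AND PROOFS =====

-- A's recursive helper produces exactly the binary digits of m followed by n and the accumulator.
lemma pvRecurrent_eq (fuel : Nat) : ∀ (m : Nat), m ≤ fuel → ∀ (n : Int) (acc : List Int),
    pvRecurrent fuel (m : Int) n acc = pvBinDigits m ++ n :: acc := by
  induction fuel with
  | zero =>
    intro m hm n acc
    interval_cases m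
    simp [pvRecurrent, pvBinDigits]
  | succ f ih =>
    intro m hm n acc
    by_cases h0 : m = 0
    · subst h0; simp [pvRecurrent, pvBinDigits]
    · have hcast : ((m : Int) : Int) ≠ 0 := by exact_mod_cast h0
      have hfd : PySem.Int.floordiv (m : Int) 2 = ((m / 2 : Nat) : Int) := by
        exact_mod_cast PySem.Int.floordiv_natCast m 2
      have hmd : PySem.Int.mod (m : Int) 2 = ((m % 2 : Nat) : Int) := by
        exact_mod_cast PySem.Int.mod_natCast m 2
      rw [pvRecurrent, if_neg hcast, hfd, hmd, ih (m / 2) (by omega)]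
      conv_rhs => rw [pvBinDigits]
      rw [dif_neg h0]
      simp

-- per-element digit equality for 1 ≤ i
lemma pvElem_eq (i : Int) (hi : 1 ≤ i) :
    (let m := PySem.Int.floordiv i 2
     let n := PySem.Int.mod i 2
     pvRecurrent (m.toNat + 1) m n []) = pvBinDigits i.toNat := by
  obtain ⟨k, hk⟩ : ∃ k : Nat, i = (k : Int) := ⟨i.toNat, by omega⟩
  subst hk
  have hfd : PySem.Int.floordiv (k : Int) 2 = ((k / 2 : Nat) : Int) := by
    exact_mod_cast PySem.Int.floordiv_natCast k 2
  have hmd : PySem.Int.mod (k : Int) 2 = ((k % 2 : Nat) : Int) := by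
    exact_mod_cast PySem.Int.mod_natCast k 2
  simp only [hfd, hmd, Int.toNat_natCast]
  rw [pvRecurrent_eq (k / 2 + 1) (k / 2) (by omega)]
  conv_rhs => rw [pvBinDigits]
  rw [dif_neg (show k ≠ 0 by omega)]

-- A's insert(0,0) loop over range(gap) is prepending gap zeros
lemma pvFoldl_prepend (l : List Int) : ∀ (init : List Int),
    l.foldl (fun acc _ => (0 : Int) :: acc) init = List.replicate l.length 0 ++ init := by
  induction l with
  | nil => intro init; simp
  | cons x t ih =>
    intro init
    simp only [List.foldl_cons, ih, List.length_cons]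
    rw [List.replicate_succ']
    simp

-- ===== VERDICT (by name: the statement is the Claim_ definition above) =====
theorem get_binary_code_spec : Claim_equal_get_binary_code := by
  intro page_count _hdom hpre
  unfold Spec_get_binary_code get_binary_code get_binary_code_alt
  have hmap : (PySem.List.pyRange 1 (page_count + 1) 1).map (fun i =>
      let m := PySem.Int.floordiv i 2
      let n := PySem.Int.mod i 2
      pvRecurrent (m.toNat + 1) m n []) =
      (PySem.List.pyRange 1 (page_count + 1) 1).map (fun i => pvBinDigits i.toNat) := by
    apply List.map_congr_left
    intro i hi
    have := (PySem.List.mem_pyRange_one.mp hi).1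
    exact pvElem_eq i this
  rw [hmap]
  simp only []
  cases hmx : PySem.List.max? (((PySem.List.pyRange 1 (page_count + 1) 1).map
      (fun i => pvBinDigits i.toNat)).map (fun c => (c.length : Int))) (fun x => x) with
  | none => rfl
  | some mx =>
    apply List.map_congr_left
    intro c _hc
    rw [pvFoldl_prepend]
    congr 1
    rw [PySem.List.length_pyRange_one]
    congr 1
    omega
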